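-- pv_equiv track=rewrite | github.com/h4sohail/code-challenges | leetcode/attendance.py | attendance
-- ===== SOURCE A (Python) =====
-- def attendance(s):
--         A_count = 0
--         for char in s:
--             if char == 'A':
--                 A_count += 1
--         if 'LLL' in s:
--                 return False
--         else:
--             if A_count <= 1:
--                 return True
--             else:
--                 return False
-- ===== SOURCE B (Python) =====
-- def attendance(s):
--     absences = 0
--     streak = 0
--     ok = True
--     for char in s:
--         if char == 'L':
--             streak += 1
--             if streak == 3:
--                 ok = False
--         else:
--             streak = 0
--             if char == 'A':
--                 absences += 1
--     return ok and absences <= 1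
-- ===== Notes on version B (the rewrite author's own statement) =====
-- stated objective: alternative
-- what changed: A counts 'A's in one loop and then searches for the substring 'LLL' separately; B makes a single pass maintaining an absence count and a consecutive-late streak (with an ok flag cleared when the streak reaches 3).
import Mathlib
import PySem

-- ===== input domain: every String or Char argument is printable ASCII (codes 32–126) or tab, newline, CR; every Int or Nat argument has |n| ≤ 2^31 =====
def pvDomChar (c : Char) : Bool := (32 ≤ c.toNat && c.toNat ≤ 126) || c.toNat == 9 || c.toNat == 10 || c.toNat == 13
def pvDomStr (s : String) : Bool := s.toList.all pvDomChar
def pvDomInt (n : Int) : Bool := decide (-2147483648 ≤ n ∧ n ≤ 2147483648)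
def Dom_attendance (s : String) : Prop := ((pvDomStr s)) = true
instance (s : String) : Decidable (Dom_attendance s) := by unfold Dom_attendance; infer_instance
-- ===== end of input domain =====

-- B fuses A's separate count loop and substring search into one pass with a streak counter (alternative decomposition, same cost).

-- ===== PORT A =====
-- count loop, then 'LLL' in s, then the ≤ 1 test — step for step as in A
def attendance (s : String) : Bool :=
  let aCount : Int := s.toList.foldl (fun acc c => if c = 'A' then acc + 1 else acc) 0
  if PySem.Str.isIn "LLL" s then false
  else if aCount ≤ 1 then true else false

-- ===== PORT B =====
-- single pass: state (absences, streak, ok); 'L' bumps the streak (ok cleared at 3), otherwise streak resets and 'A' bumps absences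
def attendance_alt (s : String) : Bool :=
  let st : Int × Int × Bool := s.toList.foldl
    (fun st c =>
      if c = 'L' then (st.1, st.2.1 + 1, if st.2.1 + 1 = 3 then false else st.2.2)
      else ((if c = 'A' then st.1 + 1 else st.1), 0, st.2.2))
    (0, 0, true)
  st.2.2 && decide (st.1 ≤ 1)

-- ===== PRECONDITION & SPEC =====
def Spec_attendance (s : String) (out : Bool) : Prop := out = attendance_alt s
instance (s : String) (out : Bool) : Decidable (Spec_attendance s out) := by unfold Spec_attendance; infer_instance

-- ===== CLAIM (what is proved, stated in full; the proofs are below) =====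
def Claim_equal_attendance : Prop := ∀ (s : String), Dom_attendance s → Spec_attendance s (attendance s)

-- ===== LEMMAS AND PROOFS =====

-- B's loop body, named for the lemmas
def bStep (st : Int × Int × Bool) (c : Char) : Int × Int × Bool :=
  if c = 'L' then (st.1, st.2.1 + 1, if st.2.1 + 1 = 3 then false else st.2.2)
  else ((if c = 'A' then st.1 + 1 else st.1), 0, st.2.2)

-- pure recursion computing whether a 3-run of 'L' completes, given k trailing 'L's already seen
def hasLLL (k : Nat) (cs : List Char) : Bool :=
  match cs with
  | [] => false
  | c :: cs => if c = 'L' then (decide (k + 1 = 3) || hasLLL (k + 1) cs) else hasLLL 0 cs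

theorem bFold_fst (cs : List Char) : ∀ (a k : Int) (ok : Bool),
    (cs.foldl bStep (a, k, ok)).1 = cs.foldl (fun acc c => if c = 'A' then acc + 1 else acc) a := by
  induction cs with
  | nil => intro a k ok; rfl
  | cons c cs ih =>
    intro a k ok
    simp only [List.foldl_cons, bStep]
    by_cases hL : c = 'L'
    · simp [hL, ih]
    · simp [hL, ih]

theorem bFold_ok (cs : List Char) : ∀ (a : Int) (k : Nat) (ok : Bool),
    (cs.foldl bStep (a, (k : Int), ok)).2.2 = (ok && !hasLLL k cs) := by
  induction cs with
  | nil => intro a k ok; simp [hasLLL]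
  | cons c cs ih =>
    intro a k ok
    rw [List.foldl_cons]
    by_cases hL : c = 'L'
    · by_cases h3 : k + 1 = 3
      · have h3' : (k : Int) + 1 = 3 := by omega
        simp only [bStep, if_pos hL, if_pos h3']
        have h := ih a (k + 1) false
        push_cast at h
        rw [h]
        simp [hasLLL, hL, h3]
      · have h3' : ¬ ((k : Int) + 1 = 3) := by omega
        simp only [bStep, if_pos hL, if_neg h3']
        have h := ih a (k + 1) ok
        push_cast at h
        rw [h]
        simp [hasLLL, hL, h3]
    · simp only [bStep, if_neg hL]
      have h := ih (if c = 'A' then a + 1 else a) 0 ok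
      simp only [Nat.cast_zero] at h
      rw [h]
      simp [hasLLL, hL]

-- hasLLL k cs (k ≤ 2) holds iff either the first 3-k characters are 'L', or 'LLL' occurs somewhere
theorem hasLLL_iff (cs : List Char) : ∀ (k : Nat), k ≤ 2 →
    (hasLLL k cs = true ↔
      (List.replicate (3 - k) 'L' <+: cs ∨ ∃ j, ['L','L','L'] <+: cs.drop j)) := by
  induction cs with
  | nil =>
    intro k hk
    simp only [hasLLL]
    constructor
    · intro h; cases h
    · rintro (h | ⟨j, h⟩)
      · have := h.length_le
        simp [List.length_replicate] at this
        omega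
      · have := h.length_le
        simp at this
  | cons c cs ih =>
    intro k hk
    by_cases hL : c = 'L'
    · subst hL
      by_cases h3 : k + 1 = 3
      · -- streak completes now
        have : hasLLL k ('L' :: cs) = true := by simp [hasLLL, h3]
        rw [this]
        simp only [true_iff]
        left
        have : 3 - k = 1 := by omega
        rw [this]
        simp [List.replicate]
      · have hk1 : k + 1 ≤ 2 := by omega
        have hstep : hasLLL k ('L' :: cs) = hasLLL (k + 1) cs := by
          simp [hasLLL, h3]
        rw [hstep, ih (k + 1) hk1]
        have hrep : List.replicate (3 - k) 'L' <+: ('L' :: cs) ↔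
            List.replicate (3 - (k + 1)) 'L' <+: cs := by
          have : 3 - k = (3 - (k + 1)) + 1 := by omega
          rw [this, List.replicate_succ, List.cons_prefix_cons]
          simp
        have hdrop : (∃ j, ['L','L','L'] <+: ('L' :: cs).drop j) ↔
            (['L','L','L'] <+: ('L' :: cs) ∨ ∃ j, ['L','L','L'] <+: cs.drop j) := by
          constructor
          · rintro ⟨j, h⟩
            cases j with
            | zero => exact Or.inl h
            | succ j => exact Or.inr ⟨j, h⟩
          · rintro (h | ⟨j, h⟩)
            · exact ⟨0, h⟩
            · exact ⟨j + 1, h⟩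
        rw [hrep, hdrop]
        constructor
        · rintro (h | h)
          · exact Or.inl h
          · exact Or.inr (Or.inr h)
        · rintro (h | h | h)
          · exact Or.inl h
          · -- 'LLL' <+: 'L'::cs gives 'LL' <+: cs, which implies replicate (3-(k+1)) 'L' <+: cs
            rw [List.cons_prefix_cons] at h
            left
            have h2 := h.2
            have hle : 3 - (k + 1) ≤ 2 := by omega
            calc List.replicate (3 - (k + 1)) 'L'
                <+: List.replicate 2 'L' := by
                  refine ⟨List.replicate (2 - (3 - (k + 1))) 'L', ?_⟩
                  rw [List.replicate_append_replicate]
                  congr 1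
                  omega
              _ <+: cs := h2
          · exact Or.inr h
    · have hstep : hasLLL k (c :: cs) = hasLLL 0 cs := by simp [hasLLL, hL]
      rw [hstep, ih 0 (by omega)]
      have hrep : ¬ (List.replicate (3 - k) 'L' <+: (c :: cs)) := by
        intro h
        have h3 : 3 - k = (3 - k - 1) + 1 := by omega
        rw [h3, List.replicate_succ, List.cons_prefix_cons] at h
        exact hL h.1.symm
      have hrep0 : List.replicate (3 - 0) 'L' <+: cs → ∃ j, ['L','L','L'] <+: cs.drop j := by
        intro h
        exact ⟨0, by simpa using h⟩
      constructor
      · rintro (h | h)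
        · obtain ⟨j, hj⟩ := hrep0 h
          exact Or.inr ⟨j + 1, hj⟩
        · obtain ⟨j, hj⟩ := h
          exact Or.inr ⟨j + 1, hj⟩
      · rintro (h | ⟨j, hj⟩)
        · exact absurd h hrep
        · cases j with
          | zero =>
            rw [List.drop_zero, List.cons_prefix_cons] at hj
            exact absurd hj.1.symm hL
          | succ j =>
            rw [List.drop_succ_cons] at hj
            exact Or.inr ⟨j, hj⟩

theorem hasLLL_eq_isIn (cs : List Char) : hasLLL 0 cs = PySem.Chars.isIn ['L','L','L'] cs := by
  rcases h : PySem.Chars.isIn ['L','L','L'] cs with _ | _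
  · rw [Bool.eq_false_iff]
    intro hcontra
    rw [hasLLL_iff cs 0 (by omega)] at hcontra
    have : ∃ j, ['L','L','L'] <+: cs.drop j := by
      rcases hcontra with h' | h'
      · exact ⟨0, by simpa using h'⟩
      · exact h'
    rw [PySem.Chars.exists_prefix_drop_iff_isIn] at this
    rw [h] at this; cases this
  · rw [hasLLL_iff cs 0 (by omega)]
    right
    rw [PySem.Chars.exists_prefix_drop_iff_isIn, h]

-- ===== VERDICT (by name: the statement is the Claim_ definition above) =====
theorem attendance_spec : Claim_equal_attendance := by
  intro s _
  show attendance s = attendance_alt s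
  have h1 := bFold_fst s.toList 0 0 true
  have h2 := bFold_ok s.toList 0 0 true
  simp only [Nat.cast_zero] at h2
  rw [hasLLL_eq_isIn] at h2
  have hisIn : PySem.Str.isIn "LLL" s = PySem.Chars.isIn ['L','L','L'] s.toList := by
    simp [PySem.Str.isIn]
  unfold attendance attendance_alt
  show (if PySem.Str.isIn "LLL" s = true then false
        else if (s.toList.foldl (fun acc c => if c = 'A' then acc + 1 else acc) (0:Int)) ≤ 1
          then true else false)
      = ((s.toList.foldl bStep ((0:Int), (0:Int), true)).2.2
          && decide ((s.toList.foldl bStep ((0:Int), (0:Int), true)).1 ≤ 1))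
  rw [h1, h2, ← hisIn]
  cases hin : PySem.Str.isIn "LLL" s
  · simp only [Bool.false_eq_true, if_false, Bool.not_false, Bool.true_and]
    split_ifs with hle <;> simp [hle]
  · simp
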